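-- pv_equiv track=rewrite | github.com/huiling-y/eventgraph_at_case | preprocess/convert_to_bio.py | break_offsets
-- ===== SOURCE A (Python) =====
-- def break_offsets(offset):
--     """
--     offset: frozenset of token index -> frozenset({2, 3, 4, 7, 8, 11, 12})
--
--     return: token index of disjoint tokens [(2,3,4), (7,8), (11,12)]
--     """
--
--     offset_l = sorted(list(offset))
--     splits = []
--     for i,num in enumerate(offset_l):
--         if i == 0:
--             splits.append(i)
--         else:
--             if num != offset_l[i-1] + 1:
--                 splits.append(i)
--     splits.append(len(offset_l))
--
--     pieces = []
--
--     for i in range(1, len(splits)):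
--         pieces.append(frozenset(offset_l[splits[i-1]:splits[i]]))
--     return pieces
-- ===== SOURCE B (Python) =====
-- def break_offsets(offset):
--     """Single pass over the sorted indices, accumulating the current
--     consecutive run directly instead of computing split positions and slicing."""
--     pieces = []
--     cur = []
--     for num in sorted(offset):
--         if cur and num == cur[-1] + 1:
--             cur.append(num)
--         else:
--             if cur:
--                 pieces.append(frozenset(cur))
--             cur = [num]
--     if cur:
--         pieces.append(frozenset(cur))
--     return pieces
-- ===== Notes on version B (the rewrite author's own statement) =====
-- stated objective: simpler
-- what changed: A computes a list of split indices over the sorted list in one pass and then slices the list at those indices in a second pass; B makes a single pass over the sorted values, accumulating the current consecutive run directly and flushing it as a frozenset whenever the run breaks, so no index list and no slicing exist.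
import Mathlib
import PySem

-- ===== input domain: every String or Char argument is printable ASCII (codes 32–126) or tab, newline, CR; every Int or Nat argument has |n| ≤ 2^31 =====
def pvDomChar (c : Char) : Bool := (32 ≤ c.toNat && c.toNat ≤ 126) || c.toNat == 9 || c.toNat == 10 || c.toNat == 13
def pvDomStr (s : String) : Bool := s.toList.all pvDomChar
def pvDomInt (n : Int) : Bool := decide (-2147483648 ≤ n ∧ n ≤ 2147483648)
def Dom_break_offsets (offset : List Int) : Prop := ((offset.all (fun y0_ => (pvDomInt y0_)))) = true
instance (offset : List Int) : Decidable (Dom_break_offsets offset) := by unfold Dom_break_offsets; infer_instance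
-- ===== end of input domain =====

-- B replaces A's two passes (split-index list, then slicing) by one pass that
-- accumulates the current consecutive run; objective: simpler.

-- ===== PORT A =====
-- the first loop: builds the list `splits` of split positions over offset_l
-- (offset_l[i-1] is in range since that branch runs only for i ≥ 1, and i < len)
def splitsFoldA (offset_l : List Int) : List Int :=
  (PySem.List.enumerate offset_l).foldl
    (fun splits p =>
      if p.1 = 0 then splits ++ [p.1]
      else if p.2 ≠ (PySem.List.pyGet? offset_l (p.1 - 1)).getD 0 + 1 then splits ++ [p.1]
      else splits) []

-- the second loop: for i in range(1, len(splits)): pieces.append(frozenset(offset_l[splits[i-1]:splits[i]]))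
-- (splits[i-1], splits[i] are in range since 1 ≤ i < len(splits))
def piecesFoldA (splits : List Int) (offset_l : List Int) : List (List Int) :=
  (PySem.List.pyRange 1 (splits.length : Int) 1).foldl
    (fun pieces i =>
      pieces ++ [PySem.Set.ofList (PySem.List.slice offset_l
        (some ((PySem.List.pyGet? splits (i - 1)).getD 0))
        (some ((PySem.List.pyGet? splits i).getD 0)))]) []

def break_offsets (offset : List Int) : List (List Int) :=
  let offset_l := PySem.List.sorted offset (fun x => x) false
  piecesFoldA (splitsFoldA offset_l ++ [(offset_l.length : Int)]) offset_l

-- ===== PORT B =====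
-- one step of B's loop: state = (pieces, cur); cur[-1] is guarded by cur ≠ []
def bStep (st : List (List Int) × List Int) (num : Int) : List (List Int) × List Int :=
  if st.2 ≠ [] ∧ num = (PySem.List.pyGet? st.2 (-1)).getD 0 + 1 then
    (st.1, st.2 ++ [num])
  else
    ((if st.2 ≠ [] then st.1 ++ [PySem.Set.ofList st.2] else st.1), [num])

def break_offsets_alt (offset : List Int) : List (List Int) :=
  let st := (PySem.List.sorted offset (fun x => x) false).foldl bStep ([], [])
  if st.2 ≠ [] then st.1 ++ [PySem.Set.ofList st.2] else st.1

-- ===== PRECONDITION & SPEC =====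
def Spec_break_offsets (offset : List Int) (out : List (List Int)) : Prop := out = break_offsets_alt offset
instance (offset : List Int) (out : List (List Int)) : Decidable (Spec_break_offsets offset out) := by unfold Spec_break_offsets; infer_instance

-- ===== CLAIM (what is proved, stated in full; the proofs are below) =====
def Claim_equal_break_offsets : Prop := ∀ (offset : List Int), Dom_break_offsets offset → Spec_break_offsets offset (break_offsets offset)

-- ===== LEMMAS AND PROOFS =====

theorem pyGet?_append_left_int {α : Type} (L t : List α) (i : Int)
    (h0 : 0 ≤ i) (h1 : i < (L.length : Int)) :
    PySem.List.pyGet? (L ++ t) i = PySem.List.pyGet? L i := by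
  rw [PySem.List.pyGet?_of_nonneg _ h0, PySem.List.pyGet?_of_nonneg _ h0,
    List.getElem?_append_left (by omega)]

theorem slice_prefix (s t : List Int) (a b : Int)
    (ha0 : 0 ≤ a) (ha : a ≤ (s.length : Int)) (hb0 : 0 ≤ b) (hb : b ≤ (s.length : Int)) :
    PySem.List.slice (s ++ t) (some a) (some b) = PySem.List.slice s (some a) (some b) := by
  rw [PySem.List.slice_toNat _ ha0 hb0, PySem.List.slice_toNat _ ha0 hb0,
    List.drop_append_of_le_length (by omega),
    List.take_append_of_le_length (by simp; omega)]

theorem slice_snoc (s : List Int) (x : Int) (a : Int)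
    (ha0 : 0 ≤ a) (ha : a ≤ (s.length : Int)) :
    PySem.List.slice (s ++ [x]) (some a) (some ((s.length : Int) + 1))
      = PySem.List.slice s (some a) (some (s.length : Int)) ++ [x] := by
  rw [PySem.List.slice_toNat _ ha0 (by omega), PySem.List.slice_toNat _ ha0 (by omega),
    List.drop_append_of_le_length (by omega),
    List.take_append]
  rw [List.take_of_length_le (by simp; omega), List.take_of_length_le (by simp; omega)]
  congr 1
  simp

theorem splitsFoldA_snoc (s : List Int) (x : Int) (hs : s ≠ []) :
    splitsFoldA (s ++ [x])
      = splitsFoldA s ++ (if x = s.getLast hs + 1 then [] else [(s.length : Int)]) := by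
  unfold splitsFoldA
  rw [PySem.List.enumerate_append, List.foldl_append]
  have hcong : List.foldl
      (fun splits p => if p.1 = 0 then splits ++ [p.1]
        else if p.2 ≠ (PySem.List.pyGet? (s ++ [x]) (p.1 - 1)).getD 0 + 1 then splits ++ [p.1]
        else splits) [] (PySem.List.enumerate s 0)
      = List.foldl
      (fun splits p => if p.1 = 0 then splits ++ [p.1]
        else if p.2 ≠ (PySem.List.pyGet? s (p.1 - 1)).getD 0 + 1 then splits ++ [p.1]
        else splits) [] (PySem.List.enumerate s 0) := by
    apply PySem.List.foldl_congr_mem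
    intro acc p hp
    rcases (PySem.List.mem_enumerate_iff _ _ _).1 hp with ⟨k, hk, rfl⟩
    by_cases h0 : ((0:Int) + k) = 0
    · simp [h0]
    · have hk1 : (1:Int) ≤ (0:Int) + k := by omega
      rw [pyGet?_append_left_int _ _ _ (by omega) (by push_cast; omega)]
  rw [hcong]
  -- the appended element (s.length, x)
  rw [show PySem.List.enumerate [x] (0 + (s.length:Int)) = [(0 + (s.length:Int), x)] from
    by rw [PySem.List.enumerate_cons, PySem.List.enumerate_nil]]
  rw [List.foldl_cons, List.foldl_nil]
  have hlen : 1 ≤ s.length := List.length_pos_iff.2 hs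
  have hget : PySem.List.pyGet? (s ++ [x]) (0 + (s.length:Int) - 1) = some (s.getLast hs) := by
    rw [pyGet?_append_left_int _ _ _ (by omega) (by omega),
      PySem.List.pyGet?_of_nonneg _ (by omega)]
    have ht : ((0:Int) + (s.length:Int) - 1).toNat = s.length - 1 := by omega
    rw [ht, List.getElem?_eq_getElem (by omega)]
    rw [List.getLast_eq_getElem]
  rw [if_neg (by omega), hget]
  simp only [Option.getD_some]
  split_ifs with h1 h2 <;> simp_all

theorem piecesFoldA_prefix (L s u : List Int)
    (hL : ∀ a ∈ L, 0 ≤ a ∧ a ≤ (s.length : Int)) :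
    piecesFoldA L (s ++ u) = piecesFoldA L s := by
  unfold piecesFoldA
  apply PySem.List.foldl_congr_mem
  intro acc i hi
  obtain ⟨hi1, hi2⟩ := (PySem.List.mem_pyRange_one).1 hi
  have h1 : PySem.List.pyGet? L (i - 1) = some L[(i-1).toNat] :=
    PySem.List.pyGet?_eq_some_getElem _ (by omega) (by omega)
  have h2 : PySem.List.pyGet? L i = some L[i.toNat] :=
    PySem.List.pyGet?_eq_some_getElem _ (by omega) (by omega)
  rw [h1, h2]
  simp only [Option.getD_some]
  obtain ⟨hb1, hb2⟩ := hL _ (List.getElem_mem (n := (i-1).toNat) (l := L) (by omega))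
  obtain ⟨hb3, hb4⟩ := hL _ (List.getElem_mem (n := i.toNat) (l := L) (by omega))
  rw [slice_prefix _ _ _ _ hb1 hb2 hb3 hb4]

theorem piecesFoldA_extend (L : List Int) (s : List Int) (c lb : Int)
    (hlb : L.getLast? = some lb) :
    piecesFoldA (L ++ [c]) s
      = piecesFoldA L s ++ [PySem.Set.ofList (PySem.List.slice s (some lb) (some c))] := by
  have hL : L ≠ [] := by rintro rfl; simp at hlb
  have hlen : 1 ≤ L.length := List.length_pos_iff.2 hL
  unfold piecesFoldA
  have hlc : ((L ++ [c]).length : Int) = (L.length : Int) + 1 := by simp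
  rw [hlc, PySem.List.pyRange_one_succ_right (by omega), List.foldl_append]
  have hcong : List.foldl
      (fun pieces i => pieces ++ [PySem.Set.ofList (PySem.List.slice s
        (some ((PySem.List.pyGet? (L ++ [c]) (i - 1)).getD 0))
        (some ((PySem.List.pyGet? (L ++ [c]) i).getD 0)))]) []
        (PySem.List.pyRange 1 (L.length : Int))
      = List.foldl
      (fun pieces i => pieces ++ [PySem.Set.ofList (PySem.List.slice s
        (some ((PySem.List.pyGet? L (i - 1)).getD 0))
        (some ((PySem.List.pyGet? L i).getD 0)))]) []
        (PySem.List.pyRange 1 (L.length : Int)) := by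
    apply PySem.List.foldl_congr_mem
    intro acc i hi
    obtain ⟨hi1, hi2⟩ := (PySem.List.mem_pyRange_one).1 hi
    rw [pyGet?_append_left_int _ _ _ (by omega) (by omega),
      pyGet?_append_left_int _ _ _ (by omega) (by omega)]
  rw [hcong, List.foldl_cons, List.foldl_nil]
  rw [pyGet?_append_left_int _ _ _ (by omega) (by omega),
    PySem.List.pyGet?_of_nonneg _ (by omega)]
  have ht : ((L.length : Int) - 1).toNat = L.length - 1 := by omega
  rw [ht, ← List.getLast?_eq_getElem?, hlb, PySem.List.pyGet?_append_length]
  simp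

theorem bStep_pos (st : List (List Int) × List Int) (num : Int)
    (h1 : st.2 ≠ []) (h2 : num = (PySem.List.pyGet? st.2 (-1)).getD 0 + 1) :
    bStep st num = (st.1, st.2 ++ [num]) := by
  unfold bStep; rw [if_pos ⟨h1, h2⟩]

theorem bStep_neg (st : List (List Int) × List Int) (num : Int)
    (h1 : st.2 ≠ []) (h2 : num ≠ (PySem.List.pyGet? st.2 (-1)).getD 0 + 1) :
    bStep st num = (st.1 ++ [PySem.Set.ofList st.2], [num]) := by
  unfold bStep; rw [if_neg (by rintro ⟨_, h⟩; exact h2 h), if_pos h1]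

theorem main_inv (s : List Int) : s ≠ [] →
    (∀ a ∈ splitsFoldA s, 0 ≤ a ∧ a ≤ (s.length : Int)) ∧
    (s.foldl bStep ([], [])).2 ≠ [] ∧
    (s.foldl bStep ([], [])).2.getLast? = s.getLast? ∧
    (∃ lb, (splitsFoldA s).getLast? = some lb ∧
      PySem.List.slice s (some lb) (some (s.length : Int)) = (s.foldl bStep ([], [])).2) ∧
    piecesFoldA (splitsFoldA s) s = (s.foldl bStep ([], [])).1 := by
  induction s using List.reverseRecOn with
  | nil => intro h; exact absurd rfl h
  | append_singleton t x ih =>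
    intro _
    by_cases ht : t = []
    · subst ht
      have hsp : splitsFoldA [x] = [0] := by
        unfold splitsFoldA
        rw [show PySem.List.enumerate [x] 0 = [(0, x)] from
          by rw [PySem.List.enumerate_cons, PySem.List.enumerate_nil]]
        simp
      have hst : List.foldl bStep ([], []) [x] = ([], [x]) := by
        simp [bStep]
      simp only [List.nil_append, hsp, hst]
      refine ⟨by intro a ha; simp at ha; omega, by simp, by simp, ⟨0, by simp, ?_⟩, ?_⟩
      · rw [PySem.List.slice_toNat _ (by omega) (by omega)]; simp
      · unfold piecesFoldA
        simp [PySem.List.pyRange_one_eq_nil]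
    · obtain ⟨hbnd, hne, hlast, ⟨lb, hlb, hslice⟩, hpieces⟩ := ih ht
      have hlen : 1 ≤ t.length := List.length_pos_iff.2 ht
      have hlb_mem : lb ∈ splitsFoldA t := List.mem_of_getLast? hlb
      obtain ⟨hlb0, hlbn⟩ := hbnd lb hlb_mem
      have hBfold : List.foldl bStep ([], []) (t ++ [x])
          = bStep (List.foldl bStep ([], []) t) x := by
        rw [List.foldl_append, List.foldl_cons, List.foldl_nil]
      have hgl : (List.foldl bStep ([], []) t).2.getLast? = some (t.getLast ht) := by
        rw [hlast, List.getLast?_eq_some_getLast ht]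
      have hlen' : ((t ++ [x]).length : Int) = (t.length : Int) + 1 := by simp
      by_cases hx : x = t.getLast ht + 1
      · -- run continues
        have hstep : bStep (List.foldl bStep ([], []) t) x
            = ((List.foldl bStep ([], []) t).1, (List.foldl bStep ([], []) t).2 ++ [x]) :=
          bStep_pos _ _ hne (by rw [PySem.List.pyGet?_neg_one, hgl]; simpa using hx)
        have hsp : splitsFoldA (t ++ [x]) = splitsFoldA t := by
          rw [splitsFoldA_snoc t x ht, if_pos hx, List.append_nil]
        rw [hBfold, hstep, hsp]
        refine ⟨?_, by simp, by simp, ⟨lb, hlb, ?_⟩, ?_⟩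
        · intro a ha; obtain ⟨h1, h2⟩ := hbnd a ha; constructor <;> [exact h1; · rw [hlen']; omega]
        · rw [hlen', slice_snoc _ _ _ hlb0 hlbn, hslice]
        · rw [piecesFoldA_prefix _ _ _ hbnd, hpieces]
      · -- run breaks
        have hstep : bStep (List.foldl bStep ([], []) t) x
            = ((List.foldl bStep ([], []) t).1
                ++ [PySem.Set.ofList (List.foldl bStep ([], []) t).2], [x]) :=
          bStep_neg _ _ hne (by rw [PySem.List.pyGet?_neg_one, hgl]; simpa using hx)
        have hsp : splitsFoldA (t ++ [x])
            = splitsFoldA t ++ [(t.length : Int)] := by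
          rw [splitsFoldA_snoc t x ht, if_neg hx]
        rw [hBfold, hstep, hsp]
        refine ⟨?_, by simp, by simp, ⟨(t.length : Int), by simp, ?_⟩, ?_⟩
        · intro a ha
          rw [List.mem_append] at ha
          rcases ha with ha | ha
          · obtain ⟨h1, h2⟩ := hbnd a ha; constructor <;> [exact h1; · rw [hlen']; omega]
          · simp at ha; subst ha; rw [hlen']; omega
        · rw [hlen', slice_snoc _ _ _ (by omega) (by omega)]
          rw [PySem.List.slice_toNat _ (by omega) (by omega)]
          simp
        · rw [piecesFoldA_extend _ _ _ _ hlb,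
            piecesFoldA_prefix _ _ _ hbnd, hpieces,
            slice_prefix _ _ _ _ hlb0 hlbn (by omega) (by omega), hslice]

theorem core_eq (s : List Int) :
    piecesFoldA (splitsFoldA s ++ [(s.length : Int)]) s
      = (let st := s.foldl bStep ([], [])
         if st.2 ≠ [] then st.1 ++ [PySem.Set.ofList st.2] else st.1) := by
  by_cases hs : s = []
  · subst hs
    have hsp : splitsFoldA ([] : List Int) = [] := by
      unfold splitsFoldA; rw [PySem.List.enumerate_nil]; rfl
    rw [hsp]
    unfold piecesFoldA
    simp [PySem.List.pyRange_one_eq_nil]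
  · obtain ⟨hbnd, hne, hlast, ⟨lb, hlb, hslice⟩, hpieces⟩ := main_inv s hs
    rw [piecesFoldA_extend _ _ _ _ hlb, hpieces, hslice]
    simp only [hne, ne_eq, not_false_iff, if_true]

-- ===== VERDICT (by name: the statement is the Claim_ definition above) =====
theorem break_offsets_spec : Claim_equal_break_offsets := by
  intro offset _
  unfold Spec_break_offsets break_offsets break_offsets_alt
  exact core_eq (PySem.List.sorted offset (fun x => x) false)
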